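-- pv_equiv track=rewrite | github.com/jamescole/cp1404practicals | prac_04/practice_and_extension_4.py | memberwise_addition
-- ===== SOURCE A (Python) =====
-- def memberwise_addition(list1, list2):
--     """
--     Returns the list that contains the sum of elements that are in the same index in the two lists.
--     """
--     longest_list, shortest_list = [], []
--     if len(list1) > len(list2):
--         longest_list = list1
--         shortest_list = list2
--     else:
--         longest_list = list2
--         shortest_list = list1
--     memberwise_addition_list = [shortest_list_number + longest_list[i] for i, shortest_list_number in
--                                 enumerate(shortest_list)]
--     if len(list1) != len(list2):
--         memberwise_addition_list += longest_list[len(shortest_list):]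
--     return memberwise_addition_list
-- ===== SOURCE B (Python) =====
-- def memberwise_addition(list1, list2):
--     """Padded single-pass re-implementation: one comprehension over the full index
--     range, treating a missing element (past a list's end) as 0 — no overlap/tail
--     split and no concatenation."""
--     n = max(len(list1), len(list2))
--     return [(list1[i] if i < len(list1) else 0) +
--             (list2[i] if i < len(list2) else 0) for i in range(n)]
-- ===== Notes on version B (the rewrite author's own statement) =====
-- stated objective: alternative
-- what changed: Replaced A's staged approach (select longest/shortest, enumerate-indexed sum over the overlap, then conditionally concatenate the leftover slice) by a single comprehension over range(max(len1,len2)) that zero-pads whichever list is exhausted, eliminating the overlap/tail split and all list concatenation.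
import Mathlib
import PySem

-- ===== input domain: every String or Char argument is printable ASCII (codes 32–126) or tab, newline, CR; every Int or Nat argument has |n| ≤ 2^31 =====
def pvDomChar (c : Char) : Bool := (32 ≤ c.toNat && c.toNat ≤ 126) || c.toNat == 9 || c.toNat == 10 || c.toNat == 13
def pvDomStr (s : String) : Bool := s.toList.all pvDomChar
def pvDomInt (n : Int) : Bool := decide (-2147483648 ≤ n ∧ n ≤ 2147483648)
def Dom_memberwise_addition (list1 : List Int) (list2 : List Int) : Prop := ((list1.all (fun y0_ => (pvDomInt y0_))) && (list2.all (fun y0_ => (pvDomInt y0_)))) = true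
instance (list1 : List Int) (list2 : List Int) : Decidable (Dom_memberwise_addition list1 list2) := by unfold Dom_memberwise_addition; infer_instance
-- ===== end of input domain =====

-- B replaces A's longest/shortest selection, enumerate-indexed overlap sum and conditional tail
-- concatenation by one comprehension over range(max(len1,len2)) with zero-padding (alternative, same output).

-- ===== PORT A =====
-- 'shortest_list_number + longest_list[i]': the index i is always < len(longest_list)
-- (shortest is never longer), so pyGetD with default 0 is exact here.
def memberwise_addition (list1 : List Int) (list2 : List Int) : List Int :=
  let p : List Int × List Int :=
    if list1.length > list2.length then (list1, list2) else (list2, list1)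
  let longest_list := p.1
  let shortest_list := p.2
  let memberwise_addition_list :=
    (PySem.List.enumerate shortest_list).map
      (fun q => q.2 + PySem.List.pyGetD longest_list q.1 0)
  if list1.length ≠ list2.length then
    memberwise_addition_list ++
      PySem.List.slice longest_list (some (shortest_list.length : Int)) none
  else
    memberwise_addition_list

-- ===== PORT B =====
-- one comprehension over range(n); 'list[i] if i < len(list) else 0' is the guarded getD below
def memberwise_addition_alt (list1 : List Int) (list2 : List Int) : List Int :=
  let n := max list1.length list2.length
  (List.range n).map (fun i =>
    (if i < list1.length then list1.getD i 0 else 0) +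
    (if i < list2.length then list2.getD i 0 else 0))

-- ===== PRECONDITION & SPEC =====
def Spec_memberwise_addition (list1 : List Int) (list2 : List Int) (out : List Int) : Prop := out = memberwise_addition_alt list1 list2
instance (list1 : List Int) (list2 : List Int) (out : List Int) : Decidable (Spec_memberwise_addition list1 list2 out) := by unfold Spec_memberwise_addition; infer_instance

-- ===== CLAIM (what is proved, stated in full; the proofs are below) =====
def Claim_equal_memberwise_addition : Prop := ∀ (list1 : List Int) (list2 : List Int), Dom_memberwise_addition list1 list2 → Spec_memberwise_addition list1 list2 (memberwise_addition list1 list2)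

-- ===== LEMMAS AND PROOFS =====

-- A's enumerate comprehension over the shorter list is a zipWith with the longer one.
theorem enum_map_eq_zipWith (s : List Int) : ∀ (l : List Int) (k : Nat),
    k + s.length ≤ l.length →
    (PySem.List.enumerate s (k : Int)).map (fun q => q.2 + PySem.List.pyGetD l q.1 0)
      = List.zipWith (· + ·) s (l.drop k) := by
  induction s with
  | nil => intro l k _; simp [PySem.List.enumerate]
  | cons x xs ih =>
    intro l k hk
    simp only [List.length_cons] at hk
    have hkl : k < l.length := by omega
    have hdrop : l.drop k = l[k] :: l.drop (k + 1) := List.drop_eq_getElem_cons hkl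
    rw [PySem.List.enumerate_cons, hdrop]
    simp only [List.map_cons, List.zipWith_cons_cons]
    have h1 : PySem.List.pyGetD l (k : Int) 0 = l[k] := by
      rw [PySem.List.pyGetD_natCast]
      exact List.getD_eq_getElem l 0 hkl
    have h2 : ((k : Int) + 1) = ((k + 1 : Nat) : Int) := by push_cast; ring
    rw [h1, h2, ih l (k + 1) (by omega)]

theorem zipWith_add_comm : ∀ (l1 l2 : List Int),
    List.zipWith (· + ·) l1 l2 = List.zipWith (· + ·) l2 l1 := by
  intro l1
  induction l1 with
  | nil => intro l2; cases l2 <;> simp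
  | cons x xs ih => intro l2; cases l2 <;> simp [ih, Int.add_comm]

-- reading a list back off its index range
theorem map_range_pad (l : List Int) :
    (List.range l.length).map (fun i => if i < l.length then l.getD i 0 else 0) = l := by
  apply List.ext_getElem
  · simp
  · intro i h1 h2
    simp only [List.getElem_map, List.getElem_range]
    rw [if_pos h2, List.getD_eq_getElem _ _ h2]

-- B's padded comprehension computed in closed form: the overlapping sums followed by both leftover tails.
theorem alt_eq_zipWith_drop : ∀ (l1 l2 : List Int),
    memberwise_addition_alt l1 l2
      = List.zipWith (· + ·) l1 l2 ++ l1.drop l2.length ++ l2.drop l1.length := by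
  intro l1
  induction l1 with
  | nil =>
    intro l2
    calc memberwise_addition_alt [] l2
        = (List.range l2.length).map (fun i => if i < l2.length then l2.getD i 0 else 0) := by
          simp only [memberwise_addition_alt, List.length_nil, Nat.zero_max]
          apply List.map_congr_left
          intro i _
          simp
      _ = _ := by rw [map_range_pad]; simp
  | cons x xs ih =>
    intro l2
    cases l2 with
    | nil =>
      calc memberwise_addition_alt (x :: xs) []
          = (List.range (x :: xs).length).map
              (fun i => if i < (x :: xs).length then (x :: xs).getD i 0 else 0) := by
            simp only [memberwise_addition_alt, List.length_nil, Nat.max_zero]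
            apply List.map_congr_left
            intro i _
            simp
        _ = _ := by rw [map_range_pad]; simp
    | cons y ys =>
      have hmax : max (x :: xs).length (y :: ys).length = max xs.length ys.length + 1 := by
        simp only [List.length_cons]; omega
      simp only [memberwise_addition_alt] at ih ⊢
      rw [hmax, List.range_succ_eq_map, List.map_cons, List.map_map]
      have htail : ∀ i ∈ List.range (max xs.length ys.length),
          ((fun i => (if i < (x :: xs).length then (x :: xs).getD i 0 else 0) +
              (if i < (y :: ys).length then (y :: ys).getD i 0 else 0)) ∘ Nat.succ) i
            = (if i < xs.length then xs.getD i 0 else 0) +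
              (if i < ys.length then ys.getD i 0 else 0) := by
        intro i _
        simp [Function.comp]
      rw [List.map_congr_left htail, ih ys]
      simp

-- ===== VERDICT (by name: the statement is the Claim_ definition above) =====
theorem memberwise_addition_spec : Claim_equal_memberwise_addition := by
  intro list1 list2 _
  unfold Spec_memberwise_addition memberwise_addition
  rw [alt_eq_zipWith_drop]
  by_cases h : list1.length > list2.length
  · have hne : list1.length ≠ list2.length := by omega
    simp only [h, if_pos]
    rw [if_pos hne]
    have hz := enum_map_eq_zipWith list2 list1 0 (by omega)
    simp only [List.drop_zero] at hz
    rw [show PySem.List.enumerate list2 = PySem.List.enumerate list2 ((0 : Nat) : Int) from rfl]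
    rw [hz, zipWith_add_comm]
    simp only [PySem.List.slice_from_natCast]
    rw [List.drop_of_length_le (l := list2) (by omega)]
    simp
  · simp only [h, if_false]
    have hz := enum_map_eq_zipWith list1 list2 0 (by omega)
    simp only [List.drop_zero] at hz
    rw [show PySem.List.enumerate list1 = PySem.List.enumerate list1 ((0 : Nat) : Int) from rfl]
    rw [hz]
    rw [List.drop_of_length_le (l := list1) (by omega)]
    by_cases he : list1.length ≠ list2.length
    · rw [if_pos he]
      simp [PySem.List.slice_from_natCast]
    · simp only [ne_eq, not_not] at he
      rw [List.drop_of_length_le (l := list2) (le_of_eq he.symm)]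
      simp [he]
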